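-- pv_equiv track=rewrite | github.com/john-h-wood/PySpace | linalg/linalg.py | find_comma
-- ===== SOURCE A (Python) =====
-- def find_comma(ln):
--     count = 0
--     for i in range(len(ln)):
--         if ln[i] == ',' and count == 1:
--             return i
--         elif ln[i] == '(' or ln[i] == '[':
--             count += 1
--         elif ln[i] == ')' or ln[i] == ']':
--             count -= 1
-- ===== SOURCE B (Python) =====
-- def find_comma(ln):
--     # depth-table decomposition: precompute running bracket depth, then scan
--     depth = [0] * len(ln)
--     d = 0
--     for i, c in enumerate(ln):
--         if c == '(' or c == '[':
--             d += 1
--         elif c == ')' or c == ']':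
--             d -= 1
--         depth[i] = d
--     for i, c in enumerate(ln):
--         if c == ',' and depth[i] == 1:
--             return i
--     return None
-- ===== Notes on version B (the rewrite author's own statement) =====
-- stated objective: alternative
-- what changed: B replaces A's single stateful early-return loop by a two-phase decomposition: it first precomputes the running bracket-depth table for every index, then scans for the first comma whose depth is 1 (comma has depth-delta 0, so the values coincide).
import Mathlib
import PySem

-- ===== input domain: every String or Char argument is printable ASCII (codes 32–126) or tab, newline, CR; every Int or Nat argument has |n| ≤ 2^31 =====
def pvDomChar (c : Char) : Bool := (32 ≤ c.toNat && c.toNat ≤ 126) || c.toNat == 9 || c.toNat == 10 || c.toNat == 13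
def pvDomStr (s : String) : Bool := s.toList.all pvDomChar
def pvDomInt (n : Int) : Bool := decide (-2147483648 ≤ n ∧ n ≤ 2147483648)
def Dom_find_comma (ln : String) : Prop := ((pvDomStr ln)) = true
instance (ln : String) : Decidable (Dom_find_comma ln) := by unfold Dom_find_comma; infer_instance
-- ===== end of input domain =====

-- B replaces A's single stateful early-return scan by a two-phase decomposition:
-- precompute the running bracket-depth table, then scan for the first comma at depth 1.

-- ===== PORT A =====
-- A's single loop: counter updated in the elif chain, early return on ',' at count 1.
def findCommaGoA : List Char → Int → Int → Option Int
  | [], _, _ => none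
  | c :: rest, i, count =>
    if c = ',' ∧ count = 1 then some i
    else if c = '(' ∨ c = '[' then findCommaGoA rest (i + 1) (count + 1)
    else if c = ')' ∨ c = ']' then findCommaGoA rest (i + 1) (count - 1)
    else findCommaGoA rest (i + 1) count

def find_comma (ln : String) : Option Int := findCommaGoA ln.toList 0 0

-- ===== PORT B =====
-- phase 1 of Source B: the running-depth table (depth AFTER processing each char)
def findCommaDepths : List Char → Int → List Int
  | [], _ => []
  | c :: rest, d =>
    let d' := if c = '(' ∨ c = '[' then d + 1 else if c = ')' ∨ c = ']' then d - 1 else d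
    d' :: findCommaDepths rest d'

-- phase 2 of Source B: scan for the first comma whose tabulated depth is 1
def findCommaScan : List (Char × Int) → Int → Option Int
  | [], _ => none
  | (c, d) :: rest, i => if c = ',' ∧ d = 1 then some i else findCommaScan rest (i + 1)

def find_comma_alt (ln : String) : Option Int :=
  findCommaScan (ln.toList.zip (findCommaDepths ln.toList 0)) 0

-- ===== PRECONDITION & SPEC =====
def Spec_find_comma (ln : String) (out : Option Int) : Prop := out = find_comma_alt ln
instance (ln : String) (out : Option Int) : Decidable (Spec_find_comma ln out) := by unfold Spec_find_comma; infer_instance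

-- ===== CLAIM (what is proved, stated in full; the proofs are below) =====
def Claim_equal_find_comma : Prop := ∀ (ln : String), Dom_find_comma ln → Spec_find_comma ln (find_comma ln)

-- ===== LEMMAS AND PROOFS =====

-- Core invariant: A's loop from counter `count` equals B's scan over the depth table seeded at `count`.
-- A comma leaves the depth unchanged, so the depth tabulated AT a comma equals A's pre-comma counter.
theorem findComma_go_eq (l : List Char) : ∀ (i count : Int),
    findCommaGoA l i count = findCommaScan (l.zip (findCommaDepths l count)) i := by
  induction l with
  | nil => intro i count; rfl
  | cons c rest ih =>
    intro i count
    simp only [findCommaGoA, findCommaDepths, List.zip_cons_cons, findCommaScan]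
    by_cases hc : c = ','
    · subst hc
      simp only [show ¬(',' = '(' ∨ ',' = '[') by decide,
        show ¬(',' = ')' ∨ ',' = ']') by decide, true_and]
      by_cases h1 : count = 1 <;> simp [h1, ih]
    · simp only [hc, false_and, if_false]
      split_ifs with h2 h3 <;> simp_all

-- ===== VERDICT (by name: the statement is the Claim_ definition above) =====

theorem find_comma_spec : Claim_equal_find_comma := by
  intro ln _
  unfold Spec_find_comma find_comma find_comma_alt
  exact findComma_go_eq ln.toList 0 0
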